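-- pv_equiv track=rewrite | github.com/lkubicki/python | domki.py | policz_domki
-- ===== SOURCE A (Python) =====
-- def policz_domki(n):
--     suma = 0
--     for i in range(n):
--         if i % 2 == 0:
--             suma += 7
--         else:
--             suma += 3
--     if n % 2 == 0:
--         suma += 4
--     return suma
-- ===== SOURCE B (Python) =====
-- def policz_domki(n):
--     m = n if n > 0 else 0
--     total = 7 * ((m + 1) // 2) + 3 * (m // 2)
--     if n % 2 == 0:
--         total += 4
--     return total
-- ===== Notes on version B (the rewrite author's own statement) =====
-- stated objective: faster
-- what changed: Replaced the linear loop over range(n) with a closed-form formula counting the even and odd indices directly (plus the same even-n bonus), computed with two integer divisions.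
import Mathlib
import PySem

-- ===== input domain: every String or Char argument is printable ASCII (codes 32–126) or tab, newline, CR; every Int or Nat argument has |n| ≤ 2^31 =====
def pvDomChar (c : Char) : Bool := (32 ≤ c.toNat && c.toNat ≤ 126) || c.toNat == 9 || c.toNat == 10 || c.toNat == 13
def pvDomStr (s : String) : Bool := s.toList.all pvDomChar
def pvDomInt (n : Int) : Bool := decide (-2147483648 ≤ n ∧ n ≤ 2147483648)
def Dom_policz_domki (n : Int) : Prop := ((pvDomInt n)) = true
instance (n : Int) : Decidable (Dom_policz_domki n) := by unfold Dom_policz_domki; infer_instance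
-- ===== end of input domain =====

-- B replaces A's O(n) loop with a closed-form O(1) formula (same value on all ints).

-- ===== PORT A =====
def policz_domki (n : Int) : Int :=
  let suma := (PySem.List.pyRange 0 n 1).foldl
    (fun suma i => if PySem.Int.mod i 2 = 0 then suma + 7 else suma + 3) 0
  if PySem.Int.mod n 2 = 0 then suma + 4 else suma

-- ===== PORT B =====
def policz_domki_alt (n : Int) : Int :=
  let m : Int := if n > 0 then n else 0
  let total := 7 * PySem.Int.floordiv (m + 1) 2 + 3 * PySem.Int.floordiv m 2
  if PySem.Int.mod n 2 = 0 then total + 4 else total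

-- ===== PRECONDITION & SPEC =====
def Spec_policz_domki (n : Int) (out : Int) : Prop := out = policz_domki_alt n
instance (n : Int) (out : Int) : Decidable (Spec_policz_domki n out) := by unfold Spec_policz_domki; infer_instance

-- ===== CLAIM (what is proved, stated in full; the proofs are below) =====
def Claim_equal_policz_domki : Prop := ∀ (n : Int), Dom_policz_domki n → Spec_policz_domki n (policz_domki n)

-- ===== LEMMAS AND PROOFS =====

-- A's loop over range(N) sums 7 on even indices and 3 on odd ones.
lemma policz_fold_range (N : Nat) :
    ((List.range N).map (fun k : Nat => ((0:Int) + (k:Int)))).foldl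
      (fun suma i => if PySem.Int.mod i 2 = 0 then suma + 7 else suma + 3) 0
    = 7 * (((N + 1) / 2 : Nat) : Int) + 3 * ((N / 2 : Nat) : Int) := by
  induction N with
  | zero => simp
  | succ N ih =>
    rw [List.range_succ, List.map_append, List.foldl_append, ih]
    simp only [List.map_cons, List.map_nil, List.foldl_cons, List.foldl_nil, zero_add]
    have hm : PySem.Int.mod (N : Int) 2 = ((N % 2 : Nat) : Int) :=
      PySem.Int.mod_natCast N 2
    rcases Nat.even_or_odd N with h | h
    · obtain ⟨k, hk⟩ := h
      have : PySem.Int.mod (N : Int) 2 = 0 := by rw [hm]; subst hk; push_cast; omega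
      rw [if_pos this]
      subst hk; push_cast; omega
    · obtain ⟨k, hk⟩ := h
      have : PySem.Int.mod (N : Int) 2 ≠ 0 := by rw [hm]; subst hk; simp
      rw [if_neg this]
      subst hk; push_cast; omega

-- ===== VERDICT (by name: the statement is the Claim_ definition above) =====
theorem policz_domki_spec : Claim_equal_policz_domki := by
  intro n _
  unfold Spec_policz_domki policz_domki policz_domki_alt
  rw [PySem.List.pyRange_one]
  simp only [sub_zero]
  rw [policz_fold_range n.toNat]
  by_cases h : n ≤ 0
  · have hz : n.toNat = 0 := Int.toNat_of_nonpos h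
    rw [hz, if_neg (by omega : ¬ n > 0)]
    simp [PySem.Int.floordiv, show Int.fdiv 1 2 = 0 from rfl]
  · rw [if_pos (by omega : n > 0)]
    have h1 : PySem.Int.floordiv (n + 1) 2 = (n + 1) / 2 :=
      PySem.Int.floordiv_eq_ediv_of_pos (by omega)
    have h2 : PySem.Int.floordiv n 2 = n / 2 :=
      PySem.Int.floordiv_eq_ediv_of_pos (by omega)
    rw [h1, h2]
    have hn : (n.toNat : Int) = n := Int.toNat_of_nonneg (by omega)
    have e1 : (((n.toNat + 1) / 2 : Nat) : Int) = (n + 1) / 2 := by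
      rw [Int.natCast_div]; push_cast [hn]; ring_nf
    have e2 : ((n.toNat / 2 : Nat) : Int) = n / 2 := by
      rw [Int.natCast_div]; rw [hn]; norm_num
    rw [e1, e2]
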